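-- pv_equiv track=rewrite | github.com/brownbreeze/StudyCodingTest | programmers/2_귤_고르기/source_20221126.py | solution
-- ===== SOURCE A (Python) =====
-- def solution(k, tangerine):
--     answer = 0
--     dictionary = dict.fromkeys(tangerine,0)
--     for tan in tangerine:
--         dictionary[tan] = dictionary[tan] + 1
--     sorted_datas = sorted(dictionary.items(), key=lambda d:d[1], reverse=True)
--     for _,v in sorted_datas:
--         k = k-v
--         answer = answer + 1
--         if k <=0 :
--             return answer
--     return answer
-- ===== SOURCE B (Python) =====
-- def solution(k, tangerine):
--     counts = {}
--     for t in tangerine: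
--         counts[t] = counts.get(t, 0) + 1
--     buckets = {}
--     m = 0
--     for c in counts.values():
--         buckets[c] = buckets.get(c, 0) + 1
--         if c > m:
--             m = c
--     answer = 0
--     for c in range(m, 0, -1):
--         for _ in range(buckets.get(c, 0)):
--             k = k - c
--             answer = answer + 1
--             if k <= 0:
--                 return answer
--     return answer
-- ===== Notes on version B (the rewrite author's own statement) =====
-- stated objective: alternative
-- what changed: Replaces the comparison sort of (size,count) pairs by a counting-sort-style bucket table keyed by frequency: count frequencies, bucket the frequency values, then walk the buckets from the maximum frequency downwards, consuming k per size.
import Mathlib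
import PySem

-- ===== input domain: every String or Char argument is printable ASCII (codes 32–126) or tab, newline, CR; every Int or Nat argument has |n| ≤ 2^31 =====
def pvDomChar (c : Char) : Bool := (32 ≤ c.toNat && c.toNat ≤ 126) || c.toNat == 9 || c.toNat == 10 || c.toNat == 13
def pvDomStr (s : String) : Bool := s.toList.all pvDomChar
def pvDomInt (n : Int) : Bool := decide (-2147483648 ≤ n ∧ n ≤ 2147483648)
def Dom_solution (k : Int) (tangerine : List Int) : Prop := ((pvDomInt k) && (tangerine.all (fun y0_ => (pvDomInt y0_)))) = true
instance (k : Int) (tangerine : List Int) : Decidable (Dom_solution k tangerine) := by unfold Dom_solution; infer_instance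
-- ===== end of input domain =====

-- B replaces A's comparison sort of (size, count) pairs by a counting-sort-style
-- bucket table keyed by frequency, walked from the maximum frequency downwards
-- (objective: alternative algorithm; proved to return the same value everywhere).

-- ===== PORT A =====
-- A's final loop over sorted_datas with its early return
def solLoopA (k answer : Int) : List (Int × Int) → Int
  | [] => answer
  | (_, v) :: rest =>
    if k - v ≤ 0 then answer + 1 else solLoopA (k - v) (answer + 1) rest

def solution (k : Int) (tangerine : List Int) : Int :=
  -- dict.fromkeys(tangerine, 0)
  let d0 := tangerine.foldl (fun d t => d.insert t (0 : Int)) (PySem.Dict.empty : PySem.Dict Int Int)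
  -- dictionary[tan] = dictionary[tan] + 1  (key always present after fromkeys, so modify is exact)
  let dictionary := tangerine.foldl (fun d t => d.modify t 0 (· + 1)) d0
  let sorted_datas := PySem.List.sorted dictionary.items (fun d => d.2) true
  solLoopA k 0 sorted_datas

-- ===== PORT B =====
-- inner 'for _ in range(buckets.get(c, 0))': .inl = early return, .inr = loop state flows on
def bInner (k answer c : Int) : Nat → Sum Int (Int × Int)
  | 0 => .inr (k, answer)
  | n + 1 => if k - c ≤ 0 then .inl (answer + 1) else bInner (k - c) (answer + 1) c n

-- outer 'for c in range(m, 0, -1)'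
def bOuter (buckets : PySem.Dict Int Int) (k answer : Int) : List Int → Int
  | [] => answer
  | c :: cs =>
    match bInner k answer c (buckets.getD c 0).toNat with
    | .inl r => r
    | .inr (k', a') => bOuter buckets k' a' cs

def solution_alt (k : Int) (tangerine : List Int) : Int :=
  let counts := tangerine.foldl (fun d t => d.insert t (d.getD t 0 + 1)) (PySem.Dict.empty : PySem.Dict Int Int)
  -- one pass over counts.values(): bucket the frequencies and track their maximum m
  let bm := counts.values.foldl
    (fun (p : PySem.Dict Int Int × Int) c => (p.1.insert c (p.1.getD c 0 + 1), if c > p.2 then c else p.2))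
    ((PySem.Dict.empty : PySem.Dict Int Int), 0)
  bOuter bm.1 k 0 (PySem.List.pyRange bm.2 0 (-1))

-- ===== PRECONDITION & SPEC =====
def Spec_solution (k : Int) (tangerine : List Int) (out : Int) : Prop := out = solution_alt k tangerine
instance (k : Int) (tangerine : List Int) (out : Int) : Decidable (Spec_solution k tangerine out) := by unfold Spec_solution; infer_instance

-- ===== CLAIM (what is proved, stated in full; the proofs are below) =====
def Claim_equal_solution : Prop := ∀ (k : Int) (tangerine : List Int), Dom_solution k tangerine → Spec_solution k tangerine (solution k tangerine)

-- ===== LEMMAS AND PROOFS =====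

-- the common core of both loops: consume the frequency values one by one
def go (k answer : Int) : List Int → Int
  | [] => answer
  | v :: vs => if k - v ≤ 0 then answer + 1 else go (k - v) (answer + 1) vs

theorem solLoopA_eq_go (ps : List (Int × Int)) : ∀ k a, solLoopA k a ps = go k a (ps.map (·.2)) := by
  induction ps with
  | nil => intro k a; rfl
  | cons p rest ih =>
    intro k a
    obtain ⟨s, v⟩ := p
    simp only [solLoopA, List.map, go]
    split
    · rfl
    · exact ih _ _

theorem go_replicate (c : Int) (n : Nat) : ∀ (k a : Int) (rest : List Int),
    go k a (List.replicate n c ++ rest) =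
      (match bInner k a c n with
       | .inl r => r
       | .inr (k', a') => go k' a' rest) := by
  induction n with
  | zero => intro k a rest; rfl
  | succ n ih =>
    intro k a rest
    simp only [List.replicate, List.cons_append, go, bInner]
    split
    · rfl
    · exact ih _ _ rest

theorem bOuter_eq_go (bk : PySem.Dict Int Int) (cs : List Int) : ∀ k a,
    bOuter bk k a cs = go k a (cs.flatMap (fun c => List.replicate (bk.getD c 0).toNat c)) := by
  induction cs with
  | nil => intro k a; rfl
  | cons c cs ih =>
    intro k a
    simp only [bOuter, List.flatMap_cons]
    rw [go_replicate]
    cases h : bInner k a c (bk.getD c 0).toNat with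
    | inl r => rfl
    | inr p => exact ih _ _

-- A's dictionary (fromkeys + increment loop) is the counter of the input
theorem ofList_update_self (l : List Int) :
    PySem.Set.update (PySem.Set.ofList l) l = PySem.Set.ofList l := by
  rw [PySem.Set.update_eq_append_filter]
  have h : List.filter (fun y => !(PySem.Set.ofList l).contains y) (PySem.Set.ofList l) = [] := by
    rw [List.filter_eq_nil_iff]
    intro a ha
    simp only [Bool.not_eq_true', Bool.not_eq_false, PySem.Set.contains_iff]
    exact ha
  rw [h, List.append_nil]

theorem getD_fold_insert_zero (k : Int) (l : List Int) : ∀ d : PySem.Dict Int Int,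
    d.getD k 0 = 0 → (l.foldl (fun d t => d.insert t (0 : Int)) d).getD k 0 = 0 := by
  induction l with
  | nil => intro d h; exact h
  | cons t l ih =>
    intro d h
    apply ih
    rw [PySem.Dict.getD_insert]
    split <;> simp [h]

theorem dictA_eq_counter (tangerine : List Int) :
    (tangerine.foldl (fun d t => d.modify t 0 (· + 1))
      (tangerine.foldl (fun d t => d.insert t (0 : Int)) PySem.Dict.empty)) =
    PySem.Dict.counter tangerine := by
  apply PySem.Dict.ext
  have hkeys : (tangerine.foldl (fun d t => d.modify t 0 (· + 1))
      (tangerine.foldl (fun d t => d.insert t (0 : Int)) PySem.Dict.empty)).keys =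
      PySem.Set.ofList tangerine := by
    rw [PySem.Dict.keys_foldl_modify, PySem.Dict.keys_foldl_insert]
    exact ofList_update_self tangerine
  have hnd : (tangerine.foldl (fun d t => d.modify t 0 (· + 1))
      (tangerine.foldl (fun d t => d.insert t (0 : Int)) PySem.Dict.empty)).keys.Nodup := by
    rw [hkeys]; exact PySem.Set.nodup_ofList tangerine
  rw [PySem.Dict.items_eq_map_keys _ hnd 0, hkeys, PySem.Dict.items_counter]
  apply List.map_congr_left
  intro a _
  rw [PySem.Dict.getD_foldl_modify_add_one, getD_fold_insert_zero a tangerine PySem.Dict.empty rfl,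
    zero_add]

-- fold computing the running maximum
theorem foldl_if_max (l : List Int) : ∀ m : Int,
    l.foldl (fun p c => if c > p then c else p) m = l.foldl max m := by
  induction l with
  | nil => intro m; rfl
  | cons c l ih =>
    intro m
    simp only [List.foldl]
    have : (if c > m then c else m) = max m c := by
      by_cases h : c > m
      · simp [h, max_eq_right h.le]
      · simp [h, max_eq_left (not_lt.mp h)]
    rw [this, ih]

theorem nodup_pyRange_neg (m : Int) : (PySem.List.pyRange m 0 (-1)).Nodup := by
  rw [PySem.List.pyRange_neg_one]
  refine List.Nodup.map ?_ List.nodup_range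
  intro i j h
  simp only at h
  omega

theorem pairwise_gt_pyRange_neg (m : Int) : (PySem.List.pyRange m 0 (-1)).Pairwise (· > ·) := by
  rw [PySem.List.pyRange_neg_one, List.pairwise_map]
  exact List.pairwise_lt_range.imp (by intro a b h; omega)

theorem flat_pairwise_gen (f : Int → Nat) : ∀ cs : List Int, cs.Pairwise (· > ·) →
    (cs.flatMap (fun c => List.replicate (f c) c)).Pairwise (fun a b => b ≤ a) := by
  intro cs
  induction cs with
  | nil => intro _; simp
  | cons c cs ih =>
    intro h
    rcases List.pairwise_cons.mp h with ⟨hc, h'⟩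
    simp only [List.flatMap_cons]
    rw [List.pairwise_append]
    refine ⟨List.pairwise_replicate.mpr (Or.inr le_rfl), ih h', ?_⟩
    intro a ha b hb
    rcases List.mem_flatMap.mp hb with ⟨c', hc', hb'⟩
    rw [List.eq_of_mem_replicate ha, List.eq_of_mem_replicate hb']
    exact (hc c' hc').le

-- counting elements of the bucket expansion
theorem count_flat_replicate (vals : List Int) (a : Int) : ∀ cs : List Int, cs.Nodup →
    ((cs.flatMap (fun c => List.replicate (vals.count c) c)).count a) =
      if a ∈ cs then vals.count a else 0 := by
  intro cs
  induction cs with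
  | nil => intro _; simp
  | cons c cs ih =>
    intro hnd
    rcases List.nodup_cons.mp hnd with ⟨hc, hnd'⟩
    simp only [List.flatMap_cons, List.count_append, ih hnd', List.count_replicate]
    by_cases hac : a = c
    · subst hac
      simp [hc]
    · simp [Ne.symm hac, hac]

-- the bucket expansion is a non-increasing permutation of vals
theorem flat_perm (vals : List Int) (m : Int)
    (h1 : ∀ v ∈ vals, 1 ≤ v ∧ v ≤ m) :
    ((PySem.List.pyRange m 0 (-1)).flatMap (fun c => List.replicate (vals.count c) c)).Perm vals := by
  rw [List.perm_iff_count]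
  intro a
  rw [count_flat_replicate vals a _ (nodup_pyRange_neg m)]
  by_cases ha : a ∈ PySem.List.pyRange m 0 (-1)
  · rw [if_pos ha]
  · rw [if_neg ha]
    rcases Nat.eq_zero_or_pos (vals.count a) with h | h
    · omega
    · exfalso
      rcases h1 a (List.count_pos_iff.mp h) with ⟨h1a, h2a⟩
      exact ha (PySem.List.mem_pyRange_neg_one.mpr ⟨by omega, h2a⟩)

theorem flat_pairwise (vals : List Int) (m : Int) :
    ((PySem.List.pyRange m 0 (-1)).flatMap (fun c => List.replicate (vals.count c) c)).Pairwise
      (fun a b => b ≤ a) :=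
  flat_pairwise_gen (fun c => vals.count c) _ (pairwise_gt_pyRange_neg m)

-- the sorted value sequence equals the bucket expansion
theorem sorted_vals_eq_flat (items : List (Int × Int)) (m : Int)
    (h1 : ∀ v ∈ items.map (·.2), 1 ≤ v ∧ v ≤ m) :
    ((PySem.List.sorted items (fun d => d.2) true).map (·.2)) =
      ((PySem.List.pyRange m 0 (-1)).flatMap (fun c => List.replicate ((items.map (·.2)).count c) c)) := by
  apply List.Perm.eq_of_pairwise (le := fun a b => b ≤ a)
  · intro a b _ _ hab hba; omega
  · rw [List.pairwise_map]
    exact PySem.List.sorted_pairwise_rev items (fun d => d.2)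
  · exact flat_pairwise _ _
  · exact ((PySem.List.sorted_perm items (fun d => d.2) true).map (·.2)).trans
      (flat_perm _ m h1).symm
-- ===== VERDICT (by name: the statement is the Claim_ definition above) =====
theorem solution_spec : Claim_equal_solution := by
  intro k t _
  simp only [Spec_solution, solution, solution_alt]
  rw [dictA_eq_counter, PySem.Dict.foldl_insert_getD_add_one_eq_counter,
    PySem.List.foldl_prod_mk (fun (d : PySem.Dict Int Int) (c : Int) => d.insert c (d.getD c 0 + 1))
      (fun (m c : Int) => if c > m then c else m) ((PySem.Dict.counter t).values) PySem.Dict.empty 0,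
    PySem.Dict.foldl_insert_getD_add_one_eq_counter, foldl_if_max,
    solLoopA_eq_go, bOuter_eq_go]
  have hgd : ∀ c : Int, ((PySem.Dict.counter (PySem.Dict.counter t).values).getD c 0).toNat
      = ((PySem.Dict.counter t).values).count c := by
    intro c
    rw [PySem.Dict.getD_counter, Int.toNat_natCast]
  simp only [hgd]
  have hv : (PySem.Dict.counter t).values = (PySem.Dict.counter t).items.map (·.2) := rfl
  rw [hv]
  have h1 : ∀ v ∈ (PySem.Dict.counter t).items.map (·.2), 1 ≤ v ∧
      v ≤ ((PySem.Dict.counter t).items.map (·.2)).foldl max 0 := by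
    intro v hvmem
    refine ⟨?_, (PySem.List.le_foldl_max _ 0).2 v hvmem⟩
    rw [PySem.Dict.items_counter, List.map_map] at hvmem
    obtain ⟨x, hx, rfl⟩ := List.mem_map.mp hvmem
    simp only [Function.comp]
    exact_mod_cast List.count_pos_iff.mpr ((PySem.Set.mem_ofList t x).mp hx)
  rw [sorted_vals_eq_flat (PySem.Dict.counter t).items _ h1]
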